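-- pv_equiv track=rewrite | github.com/jaredfung9/fung-jared-advent-of-code-repository | 2024/day_08/day8.py | calculate_reson_antinodes
-- ===== SOURCE A (Python) =====
-- def get_pairs(node_list):
--     pair_list = []
--     if len(node_list) <= 1:
--         return pair_list
--     node_a = node_list[0]
--     for node_b in node_list[1:]:
--         pair_list.append((node_a, node_b))
--     results = pair_list + get_pairs(node_list[1:])
--     return results
--
-- def calculate_vector(pair):
--     return (pair[1][0] - pair[0][0], pair[1][1] - pair[0][1])
--
-- def add_vectors(vec0, vec1):
--     return (vec0[0] + vec1[0], vec0[1] + vec1[1])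
--
-- def sub_vectors(vec0, vec1):
--     return (vec0[0] - vec1[0], vec0[1] - vec1[1])
--
-- def in_bound(boundary_pair, point):
--     x,y = point
--     bound_x, bound_y = boundary_pair
--     valid_x = (x >= 0) and (x < bound_x)
--     valid_y = (y >= 0) and (y < bound_y)
--     return valid_x and valid_y
--
-- def calculate_reson_antinodes(node_list, boundary_pair):
--     pairs = get_pairs(node_list)
--     antinodes = []
--
--     for pair in pairs:
--         antinodes.append(pair[0])
--         antinodes.append(pair[1])
--         vector = calculate_vector(pair)
--         antinode_0 = sub_vectors(pair[0], vector)
--         while (in_bound(boundary_pair, antinode_0)):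
--             antinodes.append(antinode_0)
--             antinode_0 = sub_vectors(antinode_0, vector)
--         antinode_1 = add_vectors(pair[1], vector)
--         while (in_bound(boundary_pair, antinode_1)):
--             antinodes.append(antinode_1)
--             antinode_1 = add_vectors(antinode_1, vector)
--     return antinodes
-- ===== SOURCE B (Python) =====
-- def calculate_reson_antinodes(node_list, boundary_pair):
--     bound_x, bound_y = boundary_pair
--
--     def ray(cx, cy, ex, ey):
--         # points (cx,cy) + k*(ex,ey) for k = 1.. as long as in bounds, with the
--         # number of steps computed in closed form instead of walking a loop
--         x, y = cx + ex, cy + ey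
--         if not (0 <= x < bound_x and 0 <= y < bound_y):
--             return []
--         ubs = []
--         if ex > 0:
--             ubs.append((bound_x - 1 - cx) // ex)
--         elif ex < 0:
--             ubs.append(cx // (-ex))
--         if ey > 0:
--             ubs.append((bound_y - 1 - cy) // ey)
--         elif ey < 0:
--             ubs.append(cy // (-ey))
--         k_max = min(ubs)  # ValueError when ex == ey == 0 (A loops forever there)
--         return [(cx + k * ex, cy + k * ey) for k in range(1, k_max + 1)]
--
--     out = []
--     for i in range(len(node_list)):
--         ax, ay = node_list[i]
--         for qx, qy in node_list[i + 1:]: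
--             dx, dy = qx - ax, qy - ay
--             out.append((ax, ay))
--             out.append((qx, qy))
--             out.extend(ray(ax, ay, -dx, -dy))
--             out.extend(ray(qx, qy, dx, dy))
--     return out
-- ===== Notes on version B (the rewrite author's own statement) =====
-- stated objective: alternative
-- what changed: Replaces the recursive get_pairs helper with nested index/slice loops and replaces each while-loop line walk with a closed-form step count (floor divisions give the number of in-bounds multiples) followed by a range comprehension.
-- outside the precondition, e.g. on calculate_reson_antinodes([(1, 1), (1, 1)], (4, 4)): A does not finish within the time limit, B raises ValueError
import Mathlib
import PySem

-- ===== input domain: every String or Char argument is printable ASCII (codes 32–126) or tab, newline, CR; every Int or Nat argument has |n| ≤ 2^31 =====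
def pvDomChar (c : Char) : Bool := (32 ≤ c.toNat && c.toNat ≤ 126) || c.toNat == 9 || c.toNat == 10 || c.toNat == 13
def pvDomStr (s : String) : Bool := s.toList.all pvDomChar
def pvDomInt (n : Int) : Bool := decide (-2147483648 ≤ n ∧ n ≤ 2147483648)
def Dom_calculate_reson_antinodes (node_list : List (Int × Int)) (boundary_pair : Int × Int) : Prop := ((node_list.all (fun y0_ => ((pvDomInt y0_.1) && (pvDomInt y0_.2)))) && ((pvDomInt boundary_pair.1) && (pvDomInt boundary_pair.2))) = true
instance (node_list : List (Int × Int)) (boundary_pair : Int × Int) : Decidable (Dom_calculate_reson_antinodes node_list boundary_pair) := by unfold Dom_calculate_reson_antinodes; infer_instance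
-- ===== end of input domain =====

-- B replaces the recursive pair builder with nested index/slice loops and each while-loop
-- line walk with a closed-form step count (floor divisions) plus a range comprehension;
-- objective: alternative (same cost, different algorithm).

-- ===== PORT A =====
-- get_pairs(node_list)
def pvGetPairs : List (Int × Int) → List ((Int × Int) × (Int × Int))
  | [] => []
  | [_] => []                                  -- len(node_list) <= 1
  | a :: rest => (rest.map (fun b => (a, b))) ++ pvGetPairs rest

-- in_bound(boundary_pair, point)
def pvInBound (boundary_pair point : Int × Int) : Bool :=
  (decide (point.1 ≥ 0) && decide (point.1 < boundary_pair.1)) &&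
  (decide (point.2 ≥ 0) && decide (point.2 < boundary_pair.2))

-- fuel for the two while loops; proved sufficient on Pre_ (the loops diverge outside it)
def pvFuel (boundary_pair : Int × Int) : Nat :=
  boundary_pair.1.toNat + boundary_pair.2.toNat + 1

-- while in_bound: append; antinode -= vector
def pvWalkSub (bp v : Int × Int) : Nat → (Int × Int) → List (Int × Int)
  | 0, _ => []
  | fuel + 1, p =>
      if pvInBound bp p then p :: pvWalkSub bp v fuel (p.1 - v.1, p.2 - v.2) else []

-- while in_bound: append; antinode += vector
def pvWalkAdd (bp v : Int × Int) : Nat → (Int × Int) → List (Int × Int)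
  | 0, _ => []
  | fuel + 1, p =>
      if pvInBound bp p then p :: pvWalkAdd bp v fuel (p.1 + v.1, p.2 + v.2) else []

def calculate_reson_antinodes (node_list : List (Int × Int)) (boundary_pair : Int × Int) : List (Int × Int) :=
  (pvGetPairs node_list).foldl (fun antinodes pair =>
    let vector := (pair.2.1 - pair.1.1, pair.2.2 - pair.1.2)
    ((antinodes ++ [pair.1, pair.2])
      ++ pvWalkSub boundary_pair vector (pvFuel boundary_pair) (pair.1.1 - vector.1, pair.1.2 - vector.2))
      ++ pvWalkAdd boundary_pair vector (pvFuel boundary_pair) (pair.2.1 + vector.1, pair.2.2 + vector.2)) []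

-- ===== PORT B =====
-- _ub(c, e, bound): the per-coordinate upper bounds on the step count k
def pvUb (c e bound : Int) : List Int :=
  if 0 < e then [PySem.Int.floordiv (bound - 1 - c) e]
  else if e < 0 then [PySem.Int.floordiv c (-e)]
  else []

-- ray(cx, cy, ex, ey): the in-bounds points c + k*e for k = 1..k_max, k_max in closed form
def pvRay (bp : Int × Int) (cx cy ex ey : Int) : List (Int × Int) :=
  let x := cx + ex
  let y := cy + ey
  if !((decide (x ≥ 0) && decide (x < bp.1)) && (decide (y ≥ 0) && decide (y < bp.2))) then []
  else
    let ubs := pvUb cx ex bp.1 ++ pvUb cy ey bp.2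
    -- Python's min(ubs) raises ValueError when ubs = [] (ex = ey = 0); unreachable under Pre_
    let kMax := ubs.min?.getD 0
    (PySem.List.pyRange 1 (kMax + 1) 1).map (fun k => (cx + k * ex, cy + k * ey))

def calculate_reson_antinodes_alt (node_list : List (Int × Int)) (boundary_pair : Int × Int) : List (Int × Int) :=
  (List.range node_list.length).foldl (fun out i =>
    let a := node_list.getD i (0, 0)                -- node_list[i], i < len: exact
    (node_list.drop (i + 1)).foldl (fun out q =>    -- node_list[i+1:], i+1 ≥ 0: exact
      let d := (q.1 - a.1, q.2 - a.2)
      ((out ++ [a, q])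
        ++ pvRay boundary_pair a.1 a.2 (-d.1) (-d.2))
        ++ pvRay boundary_pair q.1 q.2 d.1 d.2) out) []

-- ===== PRECONDITION & SPEC =====
-- Pre_ excludes lists containing a duplicated in-bounds point: there the pair's difference
-- vector is (0,0) and A's while loop never terminates (A returns nothing; B raises ValueError).
def Pre_calculate_reson_antinodes (node_list : List (Int × Int)) (boundary_pair : Int × Int) : Prop :=
  ∀ p ∈ node_list,
    (0 ≤ p.1 ∧ p.1 < boundary_pair.1 ∧ 0 ≤ p.2 ∧ p.2 < boundary_pair.2) →
    node_list.count p ≤ 1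
instance (node_list : List (Int × Int)) (boundary_pair : Int × Int) : Decidable (Pre_calculate_reson_antinodes node_list boundary_pair) := by unfold Pre_calculate_reson_antinodes; infer_instance

def pvWitness_calculate_reson_antinodes : (List (Int × Int)) × (Int × Int) := ([(0, 0), (2, 1)], (4, 4))

def Spec_calculate_reson_antinodes (node_list : List (Int × Int)) (boundary_pair : Int × Int) (out : List (Int × Int)) : Prop := out = calculate_reson_antinodes_alt node_list boundary_pair
instance (node_list : List (Int × Int)) (boundary_pair : Int × Int) (out : List (Int × Int)) : Decidable (Spec_calculate_reson_antinodes node_list boundary_pair out) := by unfold Spec_calculate_reson_antinodes; infer_instance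

-- ===== CLAIM (what is proved, stated in full; the proofs are below) =====
def Claim_equal_calculate_reson_antinodes : Prop := ∀ (node_list : List (Int × Int)) (boundary_pair : Int × Int), Dom_calculate_reson_antinodes node_list boundary_pair → Pre_calculate_reson_antinodes node_list boundary_pair → Spec_calculate_reson_antinodes node_list boundary_pair (calculate_reson_antinodes node_list boundary_pair)

-- ===== LEMMAS AND PROOFS =====

-- the per-pair contribution of A's loop body
def pvBlockA (bp : Int × Int) (pair : (Int × Int) × (Int × Int)) : List (Int × Int) :=
  let v := (pair.2.1 - pair.1.1, pair.2.2 - pair.1.2)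
  [pair.1, pair.2]
    ++ pvWalkSub bp v (pvFuel bp) (pair.1.1 - v.1, pair.1.2 - v.2)
    ++ pvWalkAdd bp v (pvFuel bp) (pair.2.1 + v.1, pair.2.2 + v.2)

-- the per-pair contribution of B's loop body
def pvBlockB (bp : Int × Int) (pair : (Int × Int) × (Int × Int)) : List (Int × Int) :=
  let d := (pair.2.1 - pair.1.1, pair.2.2 - pair.1.2)
  [pair.1, pair.2]
    ++ pvRay bp pair.1.1 pair.1.2 (-d.1) (-d.2)
    ++ pvRay bp pair.2.1 pair.2.2 d.1 d.2

lemma inBound_iff (bp p : Int × Int) :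
    pvInBound bp p = true ↔ (0 ≤ p.1 ∧ p.1 < bp.1) ∧ (0 ≤ p.2 ∧ p.2 < bp.2) := by
  simp [pvInBound, and_assoc]

lemma calcA_eq_flatMap (l : List (Int × Int)) (bp : Int × Int) :
    calculate_reson_antinodes l bp = (pvGetPairs l).flatMap (pvBlockA bp) := by
  unfold calculate_reson_antinodes
  rw [← List.nil_append ((pvGetPairs l).flatMap (pvBlockA bp)),
      ← PySem.List.foldl_append_eq_flatMap (pvBlockA bp) (pvGetPairs l) []]
  congr 1
  funext acc pair
  simp [pvBlockA, List.append_assoc]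

lemma pairsIdx_eq : ∀ (l : List (Int × Int)),
    (List.range l.length).flatMap
        (fun i => (l.drop (i + 1)).map (fun q => (l.getD i ((0 : Int), (0 : Int)), q)))
      = pvGetPairs l := by
  intro l
  induction l with
  | nil => rfl
  | cons a t ih =>
    cases t with
    | nil => rfl
    | cons b t' =>
      show _ = (List.map (fun q => (a, q)) (b :: t')) ++ pvGetPairs (b :: t')
      rw [List.length_cons, List.range_succ_eq_map, List.flatMap_cons, List.flatMap_map]
      congr 1

lemma calcB_eq_flatMap (l : List (Int × Int)) (bp : Int × Int) :
    calculate_reson_antinodes_alt l bp = (pvGetPairs l).flatMap (pvBlockB bp) := by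
  unfold calculate_reson_antinodes_alt
  have hinner : ∀ (i : Nat) (out : List (Int × Int)),
      (l.drop (i + 1)).foldl (fun out q =>
        ((out ++ [l.getD i (0, 0), q])
          ++ pvRay bp (l.getD i (0, 0)).1 (l.getD i (0, 0)).2
               (-(q.1 - (l.getD i (0, 0)).1)) (-(q.2 - (l.getD i (0, 0)).2)))
          ++ pvRay bp q.1 q.2 (q.1 - (l.getD i (0, 0)).1) (q.2 - (l.getD i (0, 0)).2)) out
      = out ++ (l.drop (i + 1)).flatMap (fun q => pvBlockB bp (l.getD i (0, 0), q)) := by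
    intro i out
    rw [← PySem.List.foldl_append_eq_flatMap (fun q => pvBlockB bp (l.getD i (0, 0), q)) _ out]
    congr 1
    funext acc q
    simp [pvBlockB, List.append_assoc]
  simp only [hinner]
  rw [PySem.List.foldl_append_eq_flatMap
        (fun i => (l.drop (i + 1)).flatMap (fun q => pvBlockB bp (l.getD i (0, 0), q)))
        (List.range l.length) [], List.nil_append]
  rw [← pairsIdx_eq l, List.flatMap_assoc]
  refine List.flatMap_congr ?_
  intro i _
  rw [List.flatMap_map]

lemma walkSub_eq_walkAdd_neg (bp v : Int × Int) :
    ∀ (fuel : Nat) (p : Int × Int), pvWalkSub bp v fuel p = pvWalkAdd bp (-v.1, -v.2) fuel p := by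
  intro fuel p
  induction fuel generalizing p with
  | zero => rfl
  | succ n ih => simp [pvWalkSub, pvWalkAdd, ih, sub_eq_add_neg]
lemma walkAdd_eq_map (bp e : Int × Int) :
    ∀ (n : Nat) (fuel : Nat) (c : Int × Int),
    (∀ k : Nat, k < n → pvInBound bp (c.1 + ((k : Int) + 1) * e.1, c.2 + ((k : Int) + 1) * e.2) = true) →
    pvInBound bp (c.1 + ((n : Int) + 1) * e.1, c.2 + ((n : Int) + 1) * e.2) = false →
    n ≤ fuel →
    pvWalkAdd bp e fuel (c.1 + e.1, c.2 + e.2) =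
      (List.range n).map (fun (k : Nat) => (c.1 + ((k : Int) + 1) * e.1, c.2 + ((k : Int) + 1) * e.2)) := by
  intro n
  induction n with
  | zero =>
    intro fuel c _h1 h2 _hf
    have h2' : pvInBound bp (c.1 + e.1, c.2 + e.2) = false := by
      simpa using h2
    cases fuel with
    | zero => rfl
    | succ f => simp [pvWalkAdd, h2']
  | succ n ih =>
    intro fuel c h1 h2 hf
    cases fuel with
    | zero => omega
    | succ f =>
      have h10 : pvInBound bp (c.1 + e.1, c.2 + e.2) = true := by
        simpa using h1 0 (by omega)
      simp only [pvWalkAdd, h10, if_true]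
      have h1' : ∀ k : Nat, k < n →
          pvInBound bp ((c.1 + e.1) + ((k : Int) + 1) * e.1, (c.2 + e.2) + ((k : Int) + 1) * e.2) = true := by
        intro k hk
        have hpt : ((c.1 + e.1) + ((k : Int) + 1) * e.1, (c.2 + e.2) + ((k : Int) + 1) * e.2)
            = (c.1 + (((k + 1 : Nat) : Int) + 1) * e.1, c.2 + (((k + 1 : Nat) : Int) + 1) * e.2) := by
          simp only [Prod.mk.injEq]
          constructor <;> (push_cast; ring)
        rw [hpt]
        exact h1 (k + 1) (by omega)
      have h2' : pvInBound bp ((c.1 + e.1) + ((n : Int) + 1) * e.1, (c.2 + e.2) + ((n : Int) + 1) * e.2) = false := by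
        have hpt : ((c.1 + e.1) + ((n : Int) + 1) * e.1, (c.2 + e.2) + ((n : Int) + 1) * e.2)
            = (c.1 + (((n + 1 : Nat) : Int) + 1) * e.1, c.2 + (((n + 1 : Nat) : Int) + 1) * e.2) := by
          simp only [Prod.mk.injEq]
          constructor <;> (push_cast; ring)
        rw [hpt]
        exact h2
      have ihr := ih f (c.1 + e.1, c.2 + e.2) h1' h2' (by omega)
      rw [List.range_succ_eq_map, List.map_cons, List.map_map]
      refine congrArg₂ _ (by simp only [Prod.mk.injEq]; constructor <;> (push_cast; ring)) ?_
      refine ihr.trans (List.map_congr_left ?_)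
      intro k _
      simp only [Function.comp_apply, Prod.mk.injEq]
      constructor <;> (push_cast; ring)
lemma coord_in (c e b k : Int) (h0 : 0 ≤ c + e) (hb : c + e < b) (hk1 : 1 ≤ k)
    (hub : ∀ u ∈ pvUb c e b, k ≤ u) : 0 ≤ c + k * e ∧ c + k * e < b := by
  unfold pvUb at hub
  split_ifs at hub with he1 he2
  · have h1 := (PySem.Int.le_floordiv_iff_mul_le he1).mp (hub _ (List.mem_singleton.mpr rfl))
    constructor <;> nlinarith
  · have h1 := (PySem.Int.le_floordiv_iff_mul_le (by omega : (0:Int) < -e)).mp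
      (hub _ (List.mem_singleton.mpr rfl))
    constructor <;> nlinarith
  · have he : e = 0 := by omega
    subst he; simp at *; omega
lemma coord_out (c e b u k : Int) (hu : u ∈ pvUb c e b) (hk : u < k) :
    ¬(0 ≤ c + k * e ∧ c + k * e < b) := by
  unfold pvUb at hu
  split_ifs at hu with he1 he2 <;> simp at hu
  · subst hu
    have h1 := (PySem.Int.floordiv_lt_iff_lt_mul he1).mp hk
    rintro ⟨ha, hb⟩; nlinarith
  · subst hu
    have h1 := (PySem.Int.floordiv_lt_iff_lt_mul (by omega : (0:Int) < -e)).mp hk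
    rintro ⟨ha, hb⟩; nlinarith
lemma ub_ge_one (c e b u : Int) (hu : u ∈ pvUb c e b) (h0 : 0 ≤ c + e) (hb : c + e < b) : 1 ≤ u := by
  by_contra h
  exact coord_out c e b u 1 hu (by omega) (by constructor <;> simpa)
lemma ub_le_bound (c e b u : Int) (hu : u ∈ pvUb c e b) (h0 : 0 ≤ c + e) (hb : c + e < b)
    (h1 : 1 ≤ u) : u ≤ b := by
  unfold pvUb at hu
  split_ifs at hu with he1 he2 <;> simp at hu
  · subst hu
    have h2 : PySem.Int.floordiv (b - 1 - c) e * e ≤ b - 1 - c :=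
      (PySem.Int.le_floordiv_iff_mul_le he1).mp le_rfl
    nlinarith
  · subst hu
    have h2 : PySem.Int.floordiv c (-e) * (-e) ≤ c :=
      (PySem.Int.le_floordiv_iff_mul_le (by omega : (0:Int) < -e)).mp le_rfl
    nlinarith
lemma walkAdd_eq_ray (bp : Int × Int) (c e : Int × Int)
    (h : e ≠ (0, 0) ∨ pvInBound bp (c.1 + e.1, c.2 + e.2) = false) :
    pvWalkAdd bp e (pvFuel bp) (c.1 + e.1, c.2 + e.2) = pvRay bp c.1 c.2 e.1 e.2 := by
  by_cases hin : pvInBound bp (c.1 + e.1, c.2 + e.2) = true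
  · -- in bounds; e ≠ (0,0)
    have he : ¬(e.1 = 0 ∧ e.2 = 0) := by
      rcases h with h | h
      · rintro ⟨h1, h2⟩; exact h (Prod.ext h1 h2)
      · rw [hin] at h; cases h
    obtain ⟨⟨hx0, hxb⟩, ⟨hy0, hyb⟩⟩ := (inBound_iff bp _).mp hin
    set ubs := pvUb c.1 e.1 bp.1 ++ pvUb c.2 e.2 bp.2 with hubs
    have hne : ubs ≠ [] := by
      rcases (by omega : e.1 ≠ 0 ∨ e.2 ≠ 0) with h1 | h1 <;>
        · simp only [hubs, pvUb]
          split_ifs <;> first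
            | (simp_all; omega)
            | simp_all
    obtain ⟨m, hm⟩ : ∃ m, ubs.min? = some m := by
      cases hu : ubs.min? with
      | none => exact absurd (List.min?_eq_none_iff.mp hu) hne
      | some m => exact ⟨m, rfl⟩
    obtain ⟨hmmem, hmle⟩ := List.min?_eq_some_iff.mp hm
    -- every member of ubs is ≥ 1, and m in particular
    have hub1 : ∀ u ∈ ubs, 1 ≤ u := by
      intro u hu
      rcases List.mem_append.mp hu with h' | h'
      · exact ub_ge_one _ _ _ _ h' hx0 hxb
      · exact ub_ge_one _ _ _ _ h' hy0 hyb
    have hm1 : 1 ≤ m := hub1 m hmmem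
    -- m is bounded by bp.1 or bp.2, hence m.toNat ≤ pvFuel bp
    have hmfuel : m.toNat ≤ pvFuel bp := by
      rcases List.mem_append.mp hmmem with h' | h'
      · have := ub_le_bound _ _ _ _ h' hx0 hxb hm1
        unfold pvFuel; omega
      · have := ub_le_bound _ _ _ _ h' hy0 hyb hm1
        unfold pvFuel; omega
    have hcast : ((m.toNat : Int)) = m := by omega
    -- all steps 1..m are in bounds
    have hstep : ∀ k : Nat, k < m.toNat →
        pvInBound bp (c.1 + ((k : Int) + 1) * e.1, c.2 + ((k : Int) + 1) * e.2) = true := by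
      intro k hk
      have hk1 : (1 : Int) ≤ (k : Int) + 1 := by omega
      have hkm : (k : Int) + 1 ≤ m := by omega
      have hxc := coord_in c.1 e.1 bp.1 ((k : Int) + 1) hx0 hxb hk1
        (fun u hu => le_trans hkm (hmle u (List.mem_append.mpr (Or.inl hu))))
      have hyc := coord_in c.2 e.2 bp.2 ((k : Int) + 1) hy0 hyb hk1
        (fun u hu => le_trans hkm (hmle u (List.mem_append.mpr (Or.inr hu))))
      exact (inBound_iff bp _).mpr ⟨⟨hxc.1, hxc.2⟩, ⟨hyc.1, hyc.2⟩⟩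
    -- step m+1 is out of bounds
    have hfail : pvInBound bp (c.1 + ((m.toNat : Int) + 1) * e.1, c.2 + ((m.toNat : Int) + 1) * e.2) = false := by
      rw [hcast]
      rcases List.mem_append.mp hmmem with h' | h'
      · have := coord_out c.1 e.1 bp.1 m (m + 1) h' (by omega)
        rw [← Bool.not_eq_true]
        intro hc
        obtain ⟨⟨a1, a2⟩, _⟩ := (inBound_iff bp _).mp hc
        exact this ⟨a1, a2⟩
      · have := coord_out c.2 e.2 bp.2 m (m + 1) h' (by omega)
        rw [← Bool.not_eq_true]
        intro hc
        obtain ⟨_, ⟨a1, a2⟩⟩ := (inBound_iff bp _).mp hc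
        exact this ⟨a1, a2⟩
    rw [walkAdd_eq_map bp e m.toNat (pvFuel bp) c hstep hfail hmfuel]
    -- now compute pvRay's branches
    simp only [pvRay]
    have hcond : (!((decide (c.1 + e.1 ≥ 0) && decide (c.1 + e.1 < bp.1)) &&
        (decide (c.2 + e.2 ≥ 0) && decide (c.2 + e.2 < bp.2)))) = false := by
      simp [hx0, hxb, hy0, hyb]
    simp only [hcond, Bool.false_eq_true, if_false, ← hubs, hm, Option.getD_some]
    rw [PySem.List.pyRange_one]
    rw [show (m + 1 - 1).toNat = m.toNat from by omega]
    rw [List.map_map]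
    refine List.map_congr_left ?_
    intro k _
    simp only [Function.comp_apply, Prod.mk.injEq]
    constructor <;> ring
  · -- not in bounds: both sides are []
    have hin' : pvInBound bp (c.1 + e.1, c.2 + e.2) = false := by
      cases hb : pvInBound bp (c.1 + e.1, c.2 + e.2) with
      | false => rfl
      | true => exact absurd hb hin
    have hl : pvWalkAdd bp e (pvFuel bp) (c.1 + e.1, c.2 + e.2) = [] := by
      unfold pvFuel
      simp [pvWalkAdd, hin']
    rw [hl]
    simp only [pvRay]
    have : (!((decide (c.1 + e.1 ≥ 0) && decide (c.1 + e.1 < bp.1)) &&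
        (decide (c.2 + e.2 ≥ 0) && decide (c.2 + e.2 < bp.2)))) = true := by
      simp only [pvInBound] at hin'
      simp only [Bool.not_eq_true'] at *
      exact hin'
    rw [this]
    simp
lemma mem_getPairs_dup {pr : (Int × Int) × (Int × Int)} :
    ∀ {l : List (Int × Int)}, pr ∈ pvGetPairs l → pr.1 = pr.2 → 2 ≤ l.count pr.1 := by
  intro l
  induction l with
  | nil => intro h; cases h
  | cons a t ih =>
    intro hmem heq
    cases t with
    | nil => cases hmem
    | cons b t' =>
      rcases List.mem_append.mp hmem with h | h
      · obtain ⟨q, hq, hpr⟩ := List.mem_map.mp h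
        have h1 : pr.1 = a := by rw [← hpr]
        have h2 : pr.2 = q := by rw [← hpr]
        have haq : a = q := by rw [← h1, heq, h2]
        have hqt : pr.1 ∈ b :: t' := by rw [h1, haq]; exact hq
        have : 1 ≤ (b :: t').count pr.1 := List.count_pos_iff.mpr hqt
        rw [h1] at this
        rw [List.count_cons, h1]
        simp only [BEq.rfl, if_true]
        omega
      · have := ih h heq
        rw [List.count_cons]
        split <;> omega

lemma block_eq (l : List (Int × Int)) (bp : Int × Int)
    (hpre : Pre_calculate_reson_antinodes l bp)
    (pr : (Int × Int) × (Int × Int)) (hpr : pr ∈ pvGetPairs l) :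
    pvBlockA bp pr = pvBlockB bp pr := by
  obtain ⟨⟨p1, p2⟩, ⟨q1, q2⟩⟩ := pr
  have hkey : ((p1, p2) : Int × Int) ≠ (q1, q2) ∨
      (p1 = q1 ∧ p2 = q2 ∧ pvInBound bp (p1, p2) = false) := by
    by_cases hpq : ((p1, p2) : Int × Int) = (q1, q2)
    · right
      obtain ⟨h1, h2⟩ : p1 = q1 ∧ p2 = q2 := by simpa using hpq
      refine ⟨h1, h2, ?_⟩
      have hcnt : 2 ≤ l.count ((p1, p2) : Int × Int) := mem_getPairs_dup hpr hpq
      have hmem : ((p1, p2) : Int × Int) ∈ l := List.count_pos_iff.mp (by omega)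
      have hnotin : ¬(0 ≤ p1 ∧ p1 < bp.1 ∧ 0 ≤ p2 ∧ p2 < bp.2) := by
        intro hin
        have := hpre (p1, p2) hmem hin
        omega
      cases hb : pvInBound bp (p1, p2) with
      | false => rfl
      | true =>
        obtain ⟨⟨a1, a2⟩, ⟨a3, a4⟩⟩ := (inBound_iff bp (p1, p2)).mp hb
        exact absurd ⟨a1, a2, a3, a4⟩ hnotin
    · left; exact hpq
  simp only [pvBlockA, pvBlockB]
  congr 1
  congr 1
  · -- backward ray
    rw [walkSub_eq_walkAdd_neg]
    have harg : ((p1 - (q1 - p1) : Int), (p2 - (q2 - p2) : Int))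
        = (p1 + (-(q1 - p1)), p2 + (-(q2 - p2))) := by
      simp only [Prod.mk.injEq]
      omega
    rw [harg]
    exact walkAdd_eq_ray bp (p1, p2) (-(q1 - p1), -(q2 - p2))
      (by rcases hkey with h | ⟨h1, h2, h3⟩
          · left
            intro hz
            obtain ⟨z1, z2⟩ := (by simpa using hz : -(q1 - p1) = 0 ∧ -(q2 - p2) = 0)
            exact h (by simp only [Prod.mk.injEq]; omega)
          · right
            have harg2 : ((p1 + -(q1 - p1) : Int), (p2 + -(q2 - p2) : Int)) = ((p1 : Int), (p2 : Int)) := by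
              simp only [Prod.mk.injEq]
              omega
            rw [harg2]
            exact h3)
  · -- forward ray
    exact walkAdd_eq_ray bp (q1, q2) (q1 - p1, q2 - p2)
      (by rcases hkey with h | ⟨h1, h2, h3⟩
          · left
            intro hz
            obtain ⟨z1, z2⟩ := (by simpa using hz : q1 - p1 = 0 ∧ q2 - p2 = 0)
            exact h (by simp only [Prod.mk.injEq]; omega)
          · right
            have harg2 : ((q1 + (q1 - p1) : Int), (q2 + (q2 - p2) : Int)) = ((p1 : Int), (p2 : Int)) := by
              simp only [Prod.mk.injEq]
              omega
            rw [harg2]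
            exact h3)

-- ===== VERDICT (by name: the statement is the Claim_ definition above) =====
theorem calculate_reson_antinodes_spec : Claim_equal_calculate_reson_antinodes := by
  intro l bp _hdom hpre
  unfold Spec_calculate_reson_antinodes
  rw [calcA_eq_flatMap, calcB_eq_flatMap]
  exact List.flatMap_congr (fun pr hpr => block_eq l bp hpre pr hpr)
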